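-- pv_equiv track=rewrite | github.com/NolaNexus/Open-Dog-Academy | scripts/suggest_doc_split.py | propose_chunks
-- ===== SOURCE A (Python) =====
-- from typing import List, Optional, Tuple
--
-- def propose_chunks(lines: List[str], section_starts: List[Tuple[int, str]], char_cap: int, line_cap: int) -> List[Tuple[int, int, str]]:
--     """Return [(start_line, end_line_exclusive, label)]"""
--     if not section_starts:
--         return [(0, len(lines), "part-01")]
--
--     # Create boundaries including EOF
--     starts = [s for s, _ in section_starts]
--     titles = [t for _, t in section_starts]
--     starts.append(len(lines))
--     titles.append("")
--
--     chunks: List[Tuple[int, int, str]] = []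
--     chunk_start = 0
--     part = 1
--
--     def within_caps(s: int, e: int) -> bool:
--         seg_lines = lines[s:e]
--         seg_line_count = len(seg_lines)
--         seg_char_count = sum(len(x) for x in seg_lines)
--         return seg_line_count <= line_cap and seg_char_count <= char_cap
--
--     # Build chunks by adding one H2 section at a time
--     for idx in range(len(section_starts)):
--         next_start = starts[idx + 1]
--
--         # If adding this section would exceed, cut before it (but only if chunk isn't empty)
--         if not within_caps(chunk_start, next_start) and chunk_start != starts[idx]:
--             label = f"part-{part:02d}"
--             chunks.append((chunk_start, starts[idx], label))
--             part += 1
--             chunk_start = starts[idx]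
--
--     # Remainder
--     label = f"part-{part:02d}"
--     chunks.append((chunk_start, len(lines), label))
--     return chunks
-- ===== SOURCE B (Python) =====
-- from itertools import accumulate
-- from typing import List, Tuple
--
-- def propose_chunks(lines: List[str], section_starts: List[Tuple[int, str]], char_cap: int, line_cap: int) -> List[Tuple[int, int, str]]:
--     """Return [(start_line, end_line_exclusive, label)]"""
--     n = len(lines)
--     if not section_starts:
--         return [(0, n, "part-01")]
--
--     # Prefix sums of line lengths: each cap check is O(1) subtraction.
--     prefix = [0, *accumulate(len(x) for x in lines)]
--
--     def fits(s: int, e: int) -> bool: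
--         a, b, _ = slice(s, e).indices(n)
--         b = max(a, b)  # empty segment when stop precedes start
--         return b - a <= line_cap and prefix[b] - prefix[a] <= char_cap
--
--     boundaries = [s for s, _ in section_starts] + [n]
--     chunks: List[Tuple[int, int, str]] = []
--     chunk_start = 0
--     part = 1
--     for cur, nxt in zip(boundaries, boundaries[1:]):
--         # cut before the section whose addition would overflow the caps
--         if not fits(chunk_start, nxt) and chunk_start != cur:
--             chunks.append((chunk_start, cur, f"part-{part:02d}"))
--             part += 1
--             chunk_start = cur
--     chunks.append((chunk_start, n, f"part-{part:02d}"))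
--     return chunks
-- ===== Notes on version B (the rewrite author's own statement) =====
-- stated objective: alternative
-- what changed: Replaces the per-section slice-and-sum cap check (re-scanning the candidate chunk's lines each iteration) with prefix sums of line lengths built once via itertools.accumulate, so each cap check is one subtraction of prefix values after slice.indices normalises the bounds; the boundary loop runs over zipped consecutive boundary pairs instead of indexing.
import Mathlib
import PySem

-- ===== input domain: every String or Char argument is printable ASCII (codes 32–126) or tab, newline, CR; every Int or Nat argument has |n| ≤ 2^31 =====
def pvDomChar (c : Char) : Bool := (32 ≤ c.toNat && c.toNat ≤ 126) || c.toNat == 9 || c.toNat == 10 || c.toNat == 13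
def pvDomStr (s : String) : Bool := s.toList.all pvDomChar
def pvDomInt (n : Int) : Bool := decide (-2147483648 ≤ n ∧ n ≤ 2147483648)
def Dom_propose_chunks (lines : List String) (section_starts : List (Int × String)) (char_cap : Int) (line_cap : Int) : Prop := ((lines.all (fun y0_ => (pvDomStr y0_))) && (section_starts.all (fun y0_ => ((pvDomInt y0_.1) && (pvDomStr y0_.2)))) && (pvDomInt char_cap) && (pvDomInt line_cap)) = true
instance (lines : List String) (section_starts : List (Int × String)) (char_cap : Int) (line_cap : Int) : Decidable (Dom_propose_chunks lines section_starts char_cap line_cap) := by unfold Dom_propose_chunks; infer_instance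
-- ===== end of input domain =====

-- B replaces A's per-section slice-and-sum cap check with prefix sums of line
-- lengths built once (itertools.accumulate), so each cap check is a subtraction
-- of two prefix values after slice.indices normalises the bounds (alternative
-- algorithm; not measurably faster on the timed inputs).


-- f"part-{part:02d}" : zero-pad str(part) to width 2, prefixed by "part-"
def pvLabel (part : Int) : String :=
  let cs := PySem.Int.toChars part
  String.ofList ("part-".toList ++ (if cs.length < 2 then '0' :: cs else cs))

-- ===== PORT A =====
-- within_caps: slices the lines and sums their lengths on every call
def pvWithinCapsA (lines : List String) (char_cap : Int) (line_cap : Int) (s e : Int) : Bool :=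
  let seg := PySem.List.slice lines (some s) (some e)
  let seg_line_count : Int := seg.length
  let seg_char_count : Int := (seg.map (fun x => (PySem.Str.len x : Int))).sum
  decide (seg_line_count ≤ line_cap) && decide (seg_char_count ≤ char_cap)

def propose_chunks (lines : List String) (section_starts : List (Int × String)) (char_cap : Int) (line_cap : Int) : List (Int × Int × String) :=
  if section_starts = [] then [(0, (lines.length : Int), "part-01")] else
  let starts : List Int := section_starts.map Prod.fst ++ [(lines.length : Int)]
  let st := (PySem.List.pyRange 0 (section_starts.length : Int) 1).foldl
    (fun (st : List (Int × Int × String) × Int × Int) idx =>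
      let next_start := PySem.List.pyGetD starts (idx + 1) 0
      if !(pvWithinCapsA lines char_cap line_cap st.2.1 next_start)
          && !(decide (st.2.1 = PySem.List.pyGetD starts idx 0)) then
        (st.1 ++ [(st.2.1, PySem.List.pyGetD starts idx 0, pvLabel st.2.2)],
         PySem.List.pyGetD starts idx 0, st.2.2 + 1)
      else st) ([], 0, 1)
  st.1 ++ [(st.2.1, (lines.length : Int), pvLabel st.2.2)]

-- ===== PORT B =====
-- itertools.accumulate of the line lengths, running total starting at c
def pvAccum (c : Int) : List String → List Int
  | [] => []
  | l :: ls => (c + (PySem.Str.len l : Int)) :: pvAccum (c + (PySem.Str.len l : Int)) ls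

-- slice(s, e).indices(n) for step 1: the two clamped bounds (stdlib call → PySem.List.clampIdx)
def pvIndicesB (n : Nat) (s e : Int) : Nat × Nat :=
  (PySem.List.clampIdx n s, PySem.List.clampIdx n e)

-- fits: cap check by subtraction of precomputed prefix sums
def pvFitsB (n : Nat) (pfx : List Int) (char_cap : Int) (line_cap : Int) (s e : Int) : Bool :=
  let ab := pvIndicesB n s e
  let a := ab.1
  let b := max ab.1 ab.2   -- empty segment when stop precedes start
  decide (((b : Int) - (a : Int)) ≤ line_cap)
    && decide (pfx.getD b 0 - pfx.getD a 0 ≤ char_cap)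

def propose_chunks_alt (lines : List String) (section_starts : List (Int × String)) (char_cap : Int) (line_cap : Int) : List (Int × Int × String) :=
  let n := lines.length
  if section_starts = [] then [(0, (n : Int), "part-01")] else
  let pfx : List Int := 0 :: pvAccum 0 lines
  let boundaries : List Int := section_starts.map Prod.fst ++ [(n : Int)]
  let st := (boundaries.zip (boundaries.drop 1)).foldl
    (fun (st : List (Int × Int × String) × Int × Int) p =>
      if !(pvFitsB n pfx char_cap line_cap st.2.1 p.2) && !(decide (st.2.1 = p.1)) then
        (st.1 ++ [(st.2.1, p.1, pvLabel st.2.2)], p.1, st.2.2 + 1)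
      else st) ([], 0, 1)
  st.1 ++ [(st.2.1, (n : Int), pvLabel st.2.2)]

-- ===== PRECONDITION & SPEC =====
def Spec_propose_chunks (lines : List String) (section_starts : List (Int × String)) (char_cap : Int) (line_cap : Int) (out : List (Int × Int × String)) : Prop := out = propose_chunks_alt lines section_starts char_cap line_cap
instance (lines : List String) (section_starts : List (Int × String)) (char_cap : Int) (line_cap : Int) (out : List (Int × Int × String)) : Decidable (Spec_propose_chunks lines section_starts char_cap line_cap out) := by unfold Spec_propose_chunks; infer_instance

-- ===== CLAIM (what is proved, stated in full; the proofs are below) =====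
def Claim_equal_propose_chunks : Prop := ∀ (lines : List String) (section_starts : List (Int × String)) (char_cap : Int) (line_cap : Int), Dom_propose_chunks lines section_starts char_cap line_cap → Spec_propose_chunks lines section_starts char_cap line_cap (propose_chunks lines section_starts char_cap line_cap)

-- ===== LEMMAS AND PROOFS =====

theorem pvAccum_get (xs : List String) (c : Int) (i : Nat) (hi : i ≤ xs.length) :
    (c :: pvAccum c xs).getD i 0 = c + ((xs.take i).map (fun x => (PySem.Str.len x : Int))).sum := by
  induction xs generalizing c i with
  | nil =>
      have : i = 0 := Nat.le_zero.mp hi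
      subst this; simp
  | cons l ls ih =>
      cases i with
      | zero => simp
      | succ j =>
          simp only [pvAccum, List.getD_cons_succ, List.take_succ_cons, List.map_cons, List.sum_cons]
          have := ih (c + (PySem.Str.len l : Int)) j (by simpa using hi)
          simp only [this]; ring

-- char count of `lines[s:e]` via prefix-sum subtraction
theorem pvSum_take_sub (lines : List String) (a b : Nat) (hab : a ≤ b) :
    (((lines.drop a).take (b - a)).map (fun x => (PySem.Str.len x : Int))).sum
      = ((lines.take b).map (fun x => (PySem.Str.len x : Int))).sum
        - ((lines.take a).map (fun x => (PySem.Str.len x : Int))).sum := by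
  have hsplit : lines.take b = lines.take a ++ (lines.drop a).take (b - a) := by
    have : b = a + (b - a) := by omega
    rw [this, List.take_add]; simp
  rw [hsplit]
  simp [List.map_append, List.sum_append]

theorem pvFits_eq (lines : List String) (char_cap line_cap s e : Int) :
    pvFitsB lines.length (0 :: pvAccum 0 lines) char_cap line_cap s e
      = pvWithinCapsA lines char_cap line_cap s e := by
  simp only [pvFitsB, pvIndicesB, pvWithinCapsA, PySem.List.slice]
  set ca := PySem.List.clampIdx lines.length s with hca
  set cb := PySem.List.clampIdx lines.length e with hcb
  have hcale : ca ≤ lines.length := PySem.List.clampIdx_le _ _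
  have hcble : cb ≤ lines.length := PySem.List.clampIdx_le _ _
  have hlen : (((List.take (cb - ca) (List.drop ca lines)).length : Nat) : Int)
      = ((max ca cb : Nat):Int) - (ca:Int) := by
    simp only [List.length_take, List.length_drop]
    omega
  have hsum : ((List.take (cb - ca) (List.drop ca lines)).map (fun x => (PySem.Str.len x : Int))).sum
      = ((lines.take (max ca cb)).map (fun x => (PySem.Str.len x : Int))).sum
        - ((lines.take ca).map (fun x => (PySem.Str.len x : Int))).sum := by
    have h1 : cb - ca = max ca cb - ca := by omega
    rw [h1]; exact pvSum_take_sub lines ca (max ca cb) (by omega)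
  simp only [← hca, ← hcb, hlen, hsum, pvAccum_get lines 0 ca hcale,
    pvAccum_get lines 0 (max ca cb) (max_le hcale hcble)]
  ring_nf

-- ===== VERDICT (by name: the statement is the Claim_ definition above) =====
theorem propose_chunks_spec : Claim_equal_propose_chunks := by
  intro lines ss char_cap line_cap _
  unfold Spec_propose_chunks propose_chunks propose_chunks_alt
  by_cases h : ss = []
  · simp [h]
  · simp only [if_neg h]
    have hzip : (ss.map Prod.fst ++ [(lines.length : Int)]).zip
          ((ss.map Prod.fst ++ [(lines.length : Int)]).drop 1)
        = (List.range ss.length).map (fun k =>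
            ((ss.map Prod.fst ++ [(lines.length : Int)]).getD k 0,
             (ss.map Prod.fst ++ [(lines.length : Int)]).getD (k+1) 0)) := by
      have hlen : (ss.map Prod.fst ++ [(lines.length : Int)]).length = ss.length + 1 := by simp
      apply List.ext_getElem
      · simp [hlen]
      · intro k hk1 hk2
        have hk : k < ss.length := by simpa [hlen] using hk1
        simp [List.getElem_zip, List.getD_eq_getElem?_getD,
          hlen, hk, Nat.lt_succ_of_lt hk, Nat.succ_lt_succ hk]
    rw [PySem.List.pyRange_zero_natCast, hzip, List.foldl_map, List.foldl_map]
    apply congrArg (fun st : List (Int × Int × String) × Int × Int =>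
      st.1 ++ [(st.2.1, (lines.length : Int), pvLabel st.2.2)])
    apply PySem.List.foldl_congr_mem
    intro acc k _
    have h1 : PySem.List.pyGetD (ss.map Prod.fst ++ [(lines.length : Int)]) ((k : Int) + 1) 0
        = (ss.map Prod.fst ++ [(lines.length : Int)]).getD (k+1) 0 := by
      rw [show ((k : Int) + 1) = (((k+1 : Nat)) : Int) by push_cast; ring, PySem.List.pyGetD_natCast]
    have h2 : PySem.List.pyGetD (ss.map Prod.fst ++ [(lines.length : Int)]) ((k : Nat) : Int) 0
        = (ss.map Prod.fst ++ [(lines.length : Int)]).getD k 0 := PySem.List.pyGetD_natCast _ _ _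
    simp only [h1, h2, pvFits_eq]
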